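-- pv_equiv track=rewrite | github.com/dfacoet/aoc-python | 2015/2015-16_solution.py | part2
-- ===== SOURCE A (Python) =====
-- import operator
--
-- real_sue = {
--     "children": 3,
--     "cats": 7,
--     "samoyeds": 2,
--     "pomeranians": 3,
--     "akitas": 0,
--     "vizslas": 0,
--     "goldfish": 5,
--     "trees": 3,
--     "cars": 2,
--     "perfumes": 1,
-- }
--
-- conditions = dict.fromkeys(real_sue.keys(), operator.eq)
--
-- def part2(sues: dict[int, dict[str, int]]) -> int:
--     sues_left = sues.copy()
--     for key, value in real_sue.items():
--         not_real_sues = []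
--         for n, sue in sues_left.items():
--             if key in sue and not conditions[key](sue[key], value):
--                 not_real_sues.append(n)
--         for n in not_real_sues:
--             del sues_left[n]
--
--     # check only one left and return corresponding key
--     assert len(sues_left) == 1
--     return next(iter(sues_left))
-- ===== SOURCE B (Python) =====
-- real_sue = {
--     "children": 3,
--     "cats": 7,
--     "samoyeds": 2,
--     "pomeranians": 3,
--     "akitas": 0,
--     "vizslas": 0,
--     "goldfish": 5,
--     "trees": 3,
--     "cars": 2,
--     "perfumes": 1,
-- }
--
-- def part2(sues: dict[int, dict[str, int]]) -> int:
--     # one pass: a sue matches iff every attribute it shares with real_sue agrees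
--     matches = [n for n, sue in sues.items()
--                if all(real_sue[k] == v for k, v in sue.items() if k in real_sue)]
--     assert len(matches) == 1
--     return matches[0]
-- ===== Notes on version B (the rewrite author's own statement) =====
-- stated objective: simpler
-- what changed: Replaces the 10-pass candidate-elimination (outer loop over real_sue keys, collecting and deleting non-matching sues from a shrinking dict) with a single pass that tests each sue independently against all shared attributes and collects the matching numbers; Pre_ excludes association lists with duplicate outer or inner keys (they correspond to no Python dict, so first-vs-last value is a representation accident) and inputs where the number of fully-matching sues is not exactly one (there A's assert raises AssertionError, and B's does too).
import Mathlib
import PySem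

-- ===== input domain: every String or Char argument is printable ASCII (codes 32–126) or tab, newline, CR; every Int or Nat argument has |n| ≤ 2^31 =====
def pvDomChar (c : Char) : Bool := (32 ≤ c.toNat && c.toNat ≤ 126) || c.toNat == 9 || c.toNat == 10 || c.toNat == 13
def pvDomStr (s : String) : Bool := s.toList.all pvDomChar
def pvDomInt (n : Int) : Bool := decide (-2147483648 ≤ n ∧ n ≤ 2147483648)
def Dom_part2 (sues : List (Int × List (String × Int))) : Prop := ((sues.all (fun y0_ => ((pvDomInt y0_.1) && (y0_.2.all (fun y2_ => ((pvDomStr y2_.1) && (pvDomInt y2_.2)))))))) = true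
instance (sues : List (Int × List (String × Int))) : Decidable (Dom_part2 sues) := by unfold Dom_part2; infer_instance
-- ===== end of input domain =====

-- B replaces A's 10-pass candidate elimination by one independent match test per sue; objective: simpler.
-- The dict arguments are association lists; Pre_ restricts to lists that correspond to actual Python dicts
-- (no duplicate keys) on which A's final assert succeeds.

-- ===== PORT A =====
-- the module-level real_sue dict, in insertion order
def realSue : List (String × Int) :=
  [("children", 3), ("cats", 7), ("samoyeds", 2), ("pomeranians", 3), ("akitas", 0),
   ("vizslas", 0), ("goldfish", 5), ("trees", 3), ("cars", 2), ("perfumes", 1)]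

-- `key in sue and not conditions[key](sue[key], value)`; conditions[key] is operator.eq for every key
def elimCond (kv : String × Int) (sue : List (String × Int)) : Bool :=
  match sue.lookup kv.1 with
  | some v => v != kv.2
  | none => false

def part2 (sues : List (Int × List (String × Int))) : Int :=
  -- sues_left = sues.copy(); for key, value in real_sue.items(): collect not_real_sues, then delete them
  let suesLeft := realSue.foldl (fun left kv =>
      let notReal := left.foldl (fun acc p =>
          if elimCond kv p.2 then acc ++ [p.1] else acc) []
      notReal.foldl (fun l n => l.eraseP (fun p => p.1 == n)) left) sues
  -- assert len(sues_left) == 1 (guaranteed by Pre_part2); return next(iter(sues_left)) = first key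
  ((suesLeft.head?).map Prod.fst).getD 0

-- ===== PORT B =====
-- `all(real_sue[k] == v for k, v in sue.items() if k in real_sue)`
def matchesReal (sue : List (String × Int)) : Bool :=
  sue.all (fun q =>
    match realSue.lookup q.1 with
    | some rv => rv == q.2
    | none => true)

def part2_alt (sues : List (Int × List (String × Int))) : Int :=
  let ms := sues.filterMap (fun p => if matchesReal p.2 then some p.1 else none)
  -- assert len(matches) == 1 (guaranteed by Pre_part2); return matches[0]
  ms.headD 0

-- ===== PRECONDITION & SPEC =====
-- Pre_ excludes association lists with duplicate outer or inner keys (they represent no Python dict, so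
-- which duplicate wins is a representation accident) and inputs whose number of fully-matching sues is
-- not exactly one: on those A's `assert len(sues_left) == 1` raises AssertionError (and so does B's).
def Pre_part2 (sues : List (Int × List (String × Int))) : Prop :=
  (sues.map Prod.fst).Nodup ∧ (∀ p ∈ sues, (p.2.map Prod.fst).Nodup) ∧
    sues.countP (fun p => p.2.all (fun q =>
      match realSue.lookup q.1 with
      | some rv => rv == q.2
      | none => true)) = 1
instance (sues : List (Int × List (String × Int))) : Decidable (Pre_part2 sues) := by
  unfold Pre_part2; infer_instance

def pvWitness_part2 : (List (Int × List (String × Int))) :=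
  [(7, [("children", 3), ("cats", 7)]), (2, [("cats", 9)])]

def Spec_part2 (sues : List (Int × List (String × Int))) (out : Int) : Prop := out = part2_alt sues
instance (sues : List (Int × List (String × Int))) (out : Int) : Decidable (Spec_part2 sues out) := by unfold Spec_part2; infer_instance

-- ===== CLAIM (what is proved, stated in full; the proofs are below) =====
def Claim_equal_part2 : Prop := ∀ (sues : List (Int × List (String × Int))), Dom_part2 sues → Pre_part2 sues → Spec_part2 sues (part2 sues)

-- ===== LEMMAS AND PROOFS =====

theorem lookup_mem {α β : Type} [BEq α] [LawfulBEq α] {l : List (α × β)} {k : α} {v : β}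
    (h : l.lookup k = some v) : (k, v) ∈ l := by
  induction l with
  | nil => simp [List.lookup] at h
  | cons a t ih =>
    obtain ⟨ak, av⟩ := a
    rw [List.lookup] at h
    by_cases hk : ak = k
    · simp [hk] at h
      simp [hk, h]
    · rw [show (k == ak) = false from beq_eq_false_iff_ne.mpr (fun e => hk e.symm)] at h
      exact List.mem_cons_of_mem _ (ih h)

theorem mem_lookup {α β : Type} [BEq α] [LawfulBEq α] {l : List (α × β)} {k : α} {v : β}
    (hnd : (l.map Prod.fst).Nodup) (h : (k, v) ∈ l) : l.lookup k = some v := by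
  induction l with
  | nil => simp at h
  | cons a t ih =>
    obtain ⟨ak, av⟩ := a
    rw [List.map_cons, List.nodup_cons] at hnd
    rw [List.lookup]
    rcases List.mem_cons.mp h with h | h
    · rw [Prod.mk.injEq] at h
      simp [h.1, h.2]
    · have hk : (k == ak) = false := by
        apply beq_eq_false_iff_ne.mpr
        intro e
        exact hnd.1 (e ▸ (List.mem_map.mpr ⟨(k, v), h, rfl⟩))
      rw [hk]
      exact ih hnd.2 h

-- with unique outer keys, entries of the list are determined by their key
theorem key_inj {l : List (Int × List (String × Int))} (hnd : (l.map Prod.fst).Nodup)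
    {p q : Int × List (String × Int)} (hp : p ∈ l) (hq : q ∈ l) (h : p.1 = q.1) : p = q := by
  obtain ⟨pk, pv⟩ := p
  obtain ⟨qk, qv⟩ := q
  have h1 := mem_lookup (β := List (String × Int)) hnd hp
  have h2 := mem_lookup (β := List (String × Int)) hnd hq
  simp only at h
  subst h
  rw [h1] at h2
  simp_all

-- the inner collecting loop of A builds the keys of the bad entries
theorem collect_eq (kv : String × Int) (left : List (Int × List (String × Int)))
    (acc : List Int) :
    left.foldl (fun acc p => if elimCond kv p.2 then acc ++ [p.1] else acc) acc
      = acc ++ (left.filter (fun p => elimCond kv p.2)).map Prod.fst := by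
  induction left generalizing acc with
  | nil => simp
  | cons a t ih =>
    by_cases h : elimCond kv a.2 <;> simp [List.foldl_cons, h, ih]

-- deleting one key from a nodup-key list is filtering it out
theorem eraseP_eq_filter {l : List (Int × List (String × Int))} (hnd : (l.map Prod.fst).Nodup)
    (n : Int) : l.eraseP (fun p => p.1 == n) = l.filter (fun p => p.1 != n) := by
  induction l with
  | nil => rfl
  | cons a t ih =>
    rw [List.map_cons, List.nodup_cons] at hnd
    by_cases h : a.1 = n
    · rw [List.eraseP_cons_of_pos (by simp [h])]
      rw [List.filter_cons_of_neg (by simp [h])]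
      symm
      apply List.filter_eq_self.mpr
      intro p hp
      simp only [bne_iff_ne, ne_eq]
      intro e
      exact hnd.1 (h ▸ e ▸ (List.mem_map.mpr ⟨p, hp, rfl⟩))
    · rw [List.eraseP_cons_of_neg (by simp [h])]
      rw [List.filter_cons_of_pos (by simp [h])]
      rw [ih hnd.2]

theorem nodup_filter_keys {l : List (Int × List (String × Int))} (hnd : (l.map Prod.fst).Nodup)
    (p : Int × List (String × Int) → Bool) : ((l.filter p).map Prod.fst).Nodup :=
  List.Nodup.sublist (List.Sublist.map _ (l.filter_sublist (p := p))) hnd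

-- deleting a list of keys from a nodup-key list is filtering them all out
theorem foldl_erase_eq_filter (ks : List Int) (left : List (Int × List (String × Int)))
    (hnd : (left.map Prod.fst).Nodup) :
    ks.foldl (fun l n => l.eraseP (fun p => p.1 == n)) left
      = left.filter (fun p => !ks.contains p.1) := by
  induction ks generalizing left with
  | nil => simp
  | cons n t ih =>
    rw [List.foldl_cons, eraseP_eq_filter hnd n,
        ih _ (nodup_filter_keys hnd _), List.filter_filter]
    apply List.filter_congr
    intro p _
    by_cases h1 : p.1 = n <;> by_cases h2 : p.1 ∈ t <;> simp [h1, h2]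

-- one pass of A's outer loop keeps exactly the entries not eliminated by this key
theorem step_eq (kv : String × Int) (left : List (Int × List (String × Int)))
    (hnd : (left.map Prod.fst).Nodup) :
    (let notReal := left.foldl (fun acc p => if elimCond kv p.2 then acc ++ [p.1] else acc) []
     notReal.foldl (fun l n => l.eraseP (fun p => p.1 == n)) left)
      = left.filter (fun p => !elimCond kv p.2) := by
  simp only [collect_eq kv left [], List.nil_append]
  rw [foldl_erase_eq_filter _ _ hnd]
  apply List.filter_congr
  intro p hp
  congr 1
  cases h : elimCond kv p.2
  · simp only [List.contains_eq_any_beq, List.any_eq_false]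
    intro n hn
    rcases List.mem_map.mp hn with ⟨q, hq, rfl⟩
    rcases List.mem_filter.mp hq with ⟨hq1, hq2⟩
    intro e
    have := key_inj hnd hp hq1 (eq_of_beq e)
    rw [this] at h
    rw [h] at hq2
    exact Bool.false_ne_true hq2
  · simp only [List.contains_eq_any_beq, List.any_eq_true]
    exact ⟨p.1, List.mem_map.mpr ⟨p, List.mem_filter.mpr ⟨hp, h⟩, rfl⟩, by simp⟩


-- A's whole elimination loop is one filter by the conjunction of all key conditions
theorem fold_eq (ks : List (String × Int)) (left : List (Int × List (String × Int)))
    (hnd : (left.map Prod.fst).Nodup) :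
    ks.foldl (fun left kv =>
        let notReal := left.foldl (fun acc p => if elimCond kv p.2 then acc ++ [p.1] else acc) []
        notReal.foldl (fun l n => l.eraseP (fun p => p.1 == n)) left) left
      = left.filter (fun p => ks.all (fun kv => !elimCond kv p.2)) := by
  induction ks generalizing left with
  | nil => simp
  | cons kv t ih =>
    rw [List.foldl_cons]
    rw [step_eq kv left hnd]
    rw [ih _ (nodup_filter_keys hnd _), List.filter_filter]
    apply List.filter_congr
    intro p _
    simp only [List.all_cons]
    cases elimCond kv p.2 <;> simp

-- every real_sue key looks itself up (the 10 literal keys are distinct)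
theorem realSue_lookup_self : ∀ kv ∈ realSue, realSue.lookup kv.1 = some kv.2 := by decide

-- A's per-sue survival condition agrees with B's match test on dup-free sues
theorem cond_eq (sue : List (String × Int)) (hnd : (sue.map Prod.fst).Nodup) :
    realSue.all (fun kv => !elimCond kv sue) = matchesReal sue := by
  apply Bool.eq_iff_iff.mpr
  simp only [List.all_eq_true, matchesReal, Bool.not_eq_eq_eq_not, Bool.not_true]
  constructor
  · intro h q hq
    cases hl : realSue.lookup q.1 with
    | none => simp
    | some rv =>
      have hmem : (q.1, rv) ∈ realSue := lookup_mem hl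
      have := h (q.1, rv) hmem
      unfold elimCond at this
      have hs : sue.lookup q.1 = some q.2 := mem_lookup hnd (by cases q; exact hq)
      rw [hs] at this
      simp only [bne_eq_false_iff_eq] at this
      simp [this]
  · intro h kv hkv
    unfold elimCond
    cases hs : sue.lookup kv.1 with
    | none => rfl
    | some v =>
      have hmem : (kv.1, v) ∈ sue := lookup_mem hs
      have := h (kv.1, v) hmem
      rw [realSue_lookup_self kv hkv] at this
      simp only [beq_iff_eq] at this
      simp [this]

-- B's comprehension is map-fst-of-filter
theorem filterMap_eq (sues : List (Int × List (String × Int))) :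
    sues.filterMap (fun p => if matchesReal p.2 then some p.1 else none)
      = (sues.filter (fun p => matchesReal p.2)).map Prod.fst := by
  induction sues with
  | nil => rfl
  | cons a t ih =>
    by_cases h : matchesReal a.2 <;> simp [ih, h]

-- ===== VERDICT (by name: the statement is the Claim_ definition above) =====
theorem part2_spec : Claim_equal_part2 := by
  intro sues _hdom hpre
  obtain ⟨hnd, hinner, hcount⟩ := hpre
  unfold Spec_part2 part2 part2_alt
  rw [fold_eq realSue sues hnd, filterMap_eq]
  have hfil : sues.filter (fun p => realSue.all (fun kv => !elimCond kv p.2))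
      = sues.filter (fun p => matchesReal p.2) := by
    apply List.filter_congr
    intro p hp
    exact cond_eq p.2 (hinner p hp)
  rw [hfil]
  have hlen : (sues.filter (fun p => matchesReal p.2)).length = 1 := by
    rw [← List.countP_eq_length_filter]
    exact hcount
  obtain ⟨x, hx⟩ := List.length_eq_one_iff.mp hlen
  rw [hx]
  rfl
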